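-- pv_equiv track=rewrite | github.com/diana12131990/adventOfCode | 2015/Day11/day_11_2.py | HasDoubleDoubleChar
-- ===== SOURCE A (Python) =====
-- from itertools import groupby
--
-- def HasDoubleDoubleChar(line):
--     same_char_group = [len(list(j)) for _, j in groupby(line)]
--     count = 0
--     for x in same_char_group:
--         if x > 1:
--             count += 1
--             if count == 2:
--                 return True
--     return False
-- ===== SOURCE B (Python) =====
-- def HasDoubleDoubleChar(line):
--     # Boolean-derivative formulation: mark where adjacent elements are equal,
--     # then count rising edges of that boolean sequence (= runs of length >= 2).
--     s = list(line)
--     pairs = [a == b for a, b in zip(s, s[1:])]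
--     edges = [c and not p for p, c in zip([False] + pairs, pairs)]
--     return edges.count(True) >= 2
-- ===== Notes on version B (the rewrite author's own statement) =====
-- stated objective: alternative
-- what changed: Instead of materialising groupby run lengths and scanning them with an early-exit counter, B computes the boolean adjacent-equality sequence (zip of the string with its own shift), detects its rising edges, and compares the edge count with 2.
import Mathlib
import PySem

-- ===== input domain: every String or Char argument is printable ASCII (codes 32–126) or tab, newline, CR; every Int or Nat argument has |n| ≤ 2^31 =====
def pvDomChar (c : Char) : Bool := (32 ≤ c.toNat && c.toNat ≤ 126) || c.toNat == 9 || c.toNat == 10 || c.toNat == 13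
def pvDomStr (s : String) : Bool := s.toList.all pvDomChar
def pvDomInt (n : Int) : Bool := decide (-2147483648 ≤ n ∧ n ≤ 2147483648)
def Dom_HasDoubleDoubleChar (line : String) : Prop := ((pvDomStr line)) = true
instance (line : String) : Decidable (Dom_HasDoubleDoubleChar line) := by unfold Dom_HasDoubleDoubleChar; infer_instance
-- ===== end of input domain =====

-- B replaces groupby run lengths + early-exit counting by a shift-compare boolean
-- sequence whose rising edges are counted and compared with 2; objective: alternative.

-- ===== PORT A =====
-- groupby run lengths: `[len(list(j)) for _, j in groupby(line)]`
def pvRunsAux (c : Char) (n : Nat) : List Char → List Nat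
  | [] => [n]
  | x :: xs => if x = c then pvRunsAux c (n + 1) xs else n :: pvRunsAux x 1 xs

def pvRuns : List Char → List Nat
  | [] => []
  | c :: xs => pvRunsAux c 1 xs

-- the `for x in same_char_group` loop with early return at count == 2
def pvLoopA : List Nat → Nat → Bool
  | [], _ => false
  | x :: xs, count =>
    if x > 1 then
      if count + 1 == 2 then true else pvLoopA xs (count + 1)
    else pvLoopA xs count

def HasDoubleDoubleChar (line : String) : Bool :=
  pvLoopA (pvRuns line.toList) 0

-- ===== PORT B =====
-- pairs = [a == b for a, b in zip(s, s[1:])]; edges = rising edges of pairs; edges.count(True) >= 2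
def HasDoubleDoubleChar_alt (line : String) : Bool :=
  let s := line.toList
  let pairs := List.zipWith (fun a b => a == b) s s.tail
  let edges := List.zipWith (fun p c => c && !p) (false :: pairs) pairs
  decide (2 ≤ edges.count true)

-- ===== PRECONDITION & SPEC =====
def Spec_HasDoubleDoubleChar (line : String) (out : Bool) : Prop := out = HasDoubleDoubleChar_alt line
instance (line : String) (out : Bool) : Decidable (Spec_HasDoubleDoubleChar line out) := by unfold Spec_HasDoubleDoubleChar; infer_instance

-- ===== CLAIM (what is proved, stated in full; the proofs are below) =====
def Claim_equal_HasDoubleDoubleChar : Prop := ∀ (line : String), Dom_HasDoubleDoubleChar line → Spec_HasDoubleDoubleChar line (HasDoubleDoubleChar line)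

-- ===== LEMMAS AND PROOFS =====

-- A's early-exit loop returns true exactly when count + (#elements > 1) reaches 2 (count ≤ 1)
theorem pvLoopA_true_iff (l : List Nat) : ∀ count : Nat, count ≤ 1 →
    (pvLoopA l count = true ↔ 2 ≤ count + l.countP (fun x => decide (x > 1))) := by
  induction l with
  | nil => intro count h; simp [pvLoopA]; omega
  | cons x xs ih =>
    intro count h
    by_cases hx : x > 1
    · have hxd : decide (x > 1) = true := by simpa using hx
      rcases Nat.lt_or_ge count 1 with hc | hc
      · have hc0 : count = 0 := by omega
        subst hc0
        rw [show pvLoopA (x :: xs) 0 = pvLoopA xs 1 from by simp [pvLoopA, hx],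
            ih 1 (by omega), List.countP_cons, if_pos hxd]
        omega
      · have hc1 : count = 1 := by omega
        subst hc1
        rw [show pvLoopA (x :: xs) 1 = true from by simp [pvLoopA, hx],
            List.countP_cons, if_pos hxd]
        exact iff_of_true rfl (by omega)
    · have hxd : decide (x > 1) = false := by simpa using hx
      rw [show pvLoopA (x :: xs) count = pvLoopA xs count from by simp [pvLoopA, hx],
          ih count h, List.countP_cons, if_neg (by simp [hxd])]
      omega

theorem pvLoopA_eq_count (l : List Nat) (count : Nat) (h : count ≤ 1) :
    pvLoopA l count = decide (2 ≤ count + l.countP (fun x => decide (x > 1))) :=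
  Bool.eq_iff_iff.mpr ((pvLoopA_true_iff l count h).trans (decide_eq_true_iff).symm)

-- the pair sequence of c :: xs, built structurally
def pvPairsFrom (c : Char) : List Char → List Bool
  | [] => []
  | x :: xs => (c == x) :: pvPairsFrom x xs

theorem zipWith_tail_eq_pairsFrom (c : Char) (xs : List Char) :
    List.zipWith (fun a b => a == b) (c :: xs) xs = pvPairsFrom c xs := by
  induction xs generalizing c with
  | nil => rfl
  | cons x xs ih => simp [pvPairsFrom, List.zipWith, ih x]

-- rising-edge count of the pair sequence, as a structural recursion
def pvEcount (prev : Bool) (c : Char) : List Char → Nat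
  | [] => 0
  | x :: xs => (if (c == x) && !prev then 1 else 0) + pvEcount (c == x) x xs

theorem edges_count_eq_ecount (prev : Bool) (c : Char) (xs : List Char) :
    (List.zipWith (fun p c => c && !p) (prev :: pvPairsFrom c xs) (pvPairsFrom c xs)).count true
      = pvEcount prev c xs := by
  induction xs generalizing prev c with
  | nil => rfl
  | cons x xs ih =>
    simp only [pvPairsFrom, List.zipWith, pvEcount, List.count_cons, ← ih (c == x) x]
    by_cases h : ((c == x) && !prev) = true <;> simp [h] <;> omega

-- number of runs of length > 1 = rising-edge count, with run state n and prev = (2 ≤ n)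
theorem runs_countP_eq_ecount (xs : List Char) : ∀ (c : Char) (n : Nat), 1 ≤ n →
    (pvRunsAux c n xs).countP (fun x => decide (x > 1))
      = (if 2 ≤ n then 1 else 0) + pvEcount (decide (2 ≤ n)) c xs := by
  induction xs with
  | nil =>
    intro c n hn
    by_cases h : 2 ≤ n <;> simp [pvRunsAux, pvEcount, List.countP_cons, h] <;> omega
  | cons x xs ih =>
    intro c n hn
    by_cases hx : x = c
    · subst hx
      have h1 : 2 ≤ n + 1 := by omega
      by_cases h : 2 ≤ n
      · simp [pvRunsAux, pvEcount, ih x (n + 1) (by omega), h1, h]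
      · simp [pvRunsAux, pvEcount, ih x (n + 1) (by omega), h1, h]
    · have hx' : ¬ (c == x) = true := by simpa [beq_iff_eq] using fun hh => hx hh.symm
      by_cases h : 2 ≤ n
      · have hgt : n > 1 := by omega
        simp [pvRunsAux, hx, pvEcount, List.countP_cons, ih x 1 (by omega), h, hgt, hx']
        omega
      · have hgt : ¬ n > 1 := by omega
        simp [pvRunsAux, hx, pvEcount, List.countP_cons, ih x 1 (by omega), h, hgt, hx']

-- ===== VERDICT (by name: the statement is the Claim_ definition above) =====
theorem HasDoubleDoubleChar_spec : Claim_equal_HasDoubleDoubleChar := by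
  intro line _
  unfold Spec_HasDoubleDoubleChar HasDoubleDoubleChar HasDoubleDoubleChar_alt
  cases hl : line.toList with
  | nil => simp [pvRuns, pvLoopA]
  | cons c xs =>
    simp only [List.tail_cons, zipWith_tail_eq_pairsFrom, edges_count_eq_ecount]
    rw [pvRuns, pvLoopA_eq_count _ 0 (by omega), runs_countP_eq_ecount xs c 1 (by omega)]
    norm_num
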